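-- pv_equiv track=rewrite | github.com/msabrishami/isc-website-mjhp | translator.py | md2html_notes
-- ===== SOURCE A (Python) =====
-- def md2html_notes(notes):
--     res = ""
--     for note in notes:
--         res += '''
--                 <!-- ======= Note ======= -->
--                 <div class="alert alert-primary" role="alert">
--                     {note}
--                 </div>
--         '''
--     return res
-- ===== SOURCE B (Python) =====
-- TEMPLATE = '''
--                 <!-- ======= Note ======= -->
--                 <div class="alert alert-primary" role="alert">
--                     {note}
--                 </div>
--         '''
--
-- def md2html_notes(notes):
--     return TEMPLATE * len(notes)
-- ===== Notes on version B (the rewrite author's own statement) =====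
-- stated objective: simpler
-- what changed: Replaced the per-element accumulation loop with a closed-form string multiplication: the fixed template times len(notes), since the appended block never depends on the note.
import Mathlib
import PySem

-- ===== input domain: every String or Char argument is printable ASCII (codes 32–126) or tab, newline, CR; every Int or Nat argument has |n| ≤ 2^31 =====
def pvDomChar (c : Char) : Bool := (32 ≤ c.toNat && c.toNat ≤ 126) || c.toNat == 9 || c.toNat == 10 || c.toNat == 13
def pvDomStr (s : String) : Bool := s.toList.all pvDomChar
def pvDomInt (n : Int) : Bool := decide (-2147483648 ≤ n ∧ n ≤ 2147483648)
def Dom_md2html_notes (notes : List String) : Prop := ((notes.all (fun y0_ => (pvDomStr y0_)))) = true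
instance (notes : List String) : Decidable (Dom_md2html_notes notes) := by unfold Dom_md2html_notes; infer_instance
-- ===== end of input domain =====

-- B replaces A's per-element accumulation loop by a closed-form repetition of the
-- fixed template (template * len(notes)); objective: simpler.

-- the fixed block appended per note (shared literal; both Pythons spell the same bytes)
def pvTemplate : String :=
  "\n                <!-- ======= Note ======= -->\n                <div class=\"alert alert-primary\" role=\"alert\">\n                    {note}\n                </div>\n        "

-- ===== PORT A =====
-- res = ""; for note in notes: res += template; return res
def md2html_notes (notes : List String) : String :=
  notes.foldl (fun res _note => res ++ pvTemplate) ""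

-- ===== PORT B =====
-- return TEMPLATE * len(notes)  (Python string repetition)
def md2html_notes_alt (notes : List String) : String :=
  String.join (List.replicate notes.length pvTemplate)

-- ===== PRECONDITION & SPEC =====
def Spec_md2html_notes (notes : List String) (out : String) : Prop := out = md2html_notes_alt notes
instance (notes : List String) (out : String) : Decidable (Spec_md2html_notes notes out) := by unfold Spec_md2html_notes; infer_instance

-- ===== CLAIM (what is proved, stated in full; the proofs are below) =====
def Claim_equal_md2html_notes : Prop := ∀ (notes : List String), Dom_md2html_notes notes → Spec_md2html_notes notes (md2html_notes notes)

-- ===== LEMMAS AND PROOFS =====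

theorem pv_join_out (acc : String) (l : List String) :
    l.foldl (· ++ ·) acc = acc ++ l.foldl (· ++ ·) "" := by
  induction l generalizing acc with
  | nil => simp
  | cons x xs ih =>
      simp only [List.foldl_cons, String.empty_append]
      rw [ih, ih x, String.append_assoc]

theorem pv_join_cons (a : String) (l : List String) :
    String.join (a :: l) = a ++ String.join l := by
  simp only [String.join, List.foldl_cons]
  rw [pv_join_out]
  simp

theorem pv_foldl_repeat (l : List String) (acc : String) :
    l.foldl (fun res _ => res ++ pvTemplate) acc
      = acc ++ String.join (List.replicate l.length pvTemplate) := by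
  induction l generalizing acc with
  | nil => simp [String.join]
  | cons x xs ih =>
      simp only [List.foldl_cons, List.length_cons, List.replicate_succ, pv_join_cons]
      rw [ih, String.append_assoc]

-- ===== VERDICT (by name: the statement is the Claim_ definition above) =====
theorem md2html_notes_spec : Claim_equal_md2html_notes := by
  intro notes _
  unfold Spec_md2html_notes md2html_notes md2html_notes_alt
  simpa using pv_foldl_repeat notes ""
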